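-- pv_equiv track=rewrite | github.com/Revi1337/BaekJoon-Coding-Test | 백준/Gold/1253. 좋다/좋다.py | solution
-- ===== SOURCE A (Python) =====
-- def solution(N, arr):
--     arr.sort()
--     ans = 0
--     for idx in range(N):
--         num, left, right = arr[idx], 0, N - 1
--         while left < right:
--             if left == idx:
--                 left += 1
--                 continue
--             if right == idx:
--                 right -= 1
--                 continue
--
--             if arr[left] + arr[right] == num:
--                 ans += 1
--                 break
--             if arr[left] + arr[right] < num:
--                 left += 1
--             else:
--                 right -= 1
--
--     return ans
-- ===== SOURCE B (Python) =====
-- def solution(N, arr):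
--     arr.sort()
--     ans = 0
--     for idx in range(N):
--         num = arr[idx]
--         seen = set()
--         for j in range(N):
--             if j == idx:
--                 continue
--             if num - arr[j] in seen:
--                 ans += 1
--                 break
--             seen.add(arr[j])
--     return ans
-- ===== Notes on version B (the rewrite author's own statement) =====
-- stated objective: alternative
-- what changed: The sorted two-pointer inner search is replaced by a hash-set two-sum scan per element (for each idx, one pass over the array checking num - arr[j] against a set of previously seen values), removing all order-dependent pointer logic; the in-place sort is kept for the side effect.
import Mathlib
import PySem

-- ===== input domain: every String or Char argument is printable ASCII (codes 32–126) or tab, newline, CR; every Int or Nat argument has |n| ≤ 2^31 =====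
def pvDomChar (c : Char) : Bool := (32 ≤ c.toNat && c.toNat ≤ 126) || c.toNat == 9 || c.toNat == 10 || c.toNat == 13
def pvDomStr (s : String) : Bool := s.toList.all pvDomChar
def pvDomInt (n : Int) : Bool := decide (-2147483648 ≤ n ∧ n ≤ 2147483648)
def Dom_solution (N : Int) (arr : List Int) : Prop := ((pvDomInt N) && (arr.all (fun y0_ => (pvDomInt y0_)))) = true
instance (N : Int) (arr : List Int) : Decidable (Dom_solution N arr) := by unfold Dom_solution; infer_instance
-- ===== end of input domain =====

-- B replaces A's sorted two-pointer inner search by a per-element hash-set two-sum scan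
-- (alternative algorithm, similar cost); in Python both A and B sort arr in place (same
-- observable mutation); the equivalence proved here is about the return value.


-- ===== PORT A =====
-- arr[i] for a nonnegative in-range index; the .getD 0 default is never reached under
-- Pre_solution (out of range Python raises IndexError, and Pre_ excludes exactly that).
def pvGet (a : List Int) (i : Int) : Int := (PySem.List.pyGet? a i).getD 0

-- the `while left < right` loop of A; returns what the loop adds to ans (1 on break, else 0)
def twoPtr (a : List Int) (idx num left right : Int) : Int :=
  if _h : left < right then
    if left = idx then twoPtr a idx num (left + 1) right
    else if right = idx then twoPtr a idx num left (right - 1)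
    else if pvGet a left + pvGet a right = num then 1
    else if pvGet a left + pvGet a right < num then twoPtr a idx num (left + 1) right
    else twoPtr a idx num left (right - 1)
  else 0
termination_by (right - left).toNat
decreasing_by all_goals omega

def solution (N : Int) (arr : List Int) : Int :=
  let a := PySem.List.sorted arr (fun x => x) false
  (PySem.List.pyRange 0 N 1).foldl
    (fun ans idx => ans + twoPtr a idx (pvGet a idx) 0 (N - 1)) 0

-- ===== PORT B =====
-- the inner `for j in range(N)` loop of B with its `seen` set; returns 1 on break, else 0
def setScan (a : List Int) (idx num N' j : Int) (seen : PySem.Set Int) : Int :=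
  if _h : j < N' then
    if j = idx then setScan a idx num N' (j + 1) seen
    else if PySem.Set.contains seen (num - pvGet a j) then 1
    else setScan a idx num N' (j + 1) (PySem.Set.add seen (pvGet a j))
  else 0
termination_by (N' - j).toNat
decreasing_by all_goals omega

def solution_alt (N : Int) (arr : List Int) : Int :=
  let a := PySem.List.sorted arr (fun x => x) false
  (PySem.List.pyRange 0 N 1).foldl
    (fun ans idx => ans + setScan a idx (pvGet a idx) N 0 PySem.Set.empty) 0

-- ===== PRECONDITION & SPEC =====
-- Pre_ excludes exactly N > len(arr): there Python A (and Python B) raise IndexError on arr[idx].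
def Pre_solution (N : Int) (arr : List Int) : Prop := N ≤ (arr.length : Int)
instance (N : Int) (arr : List Int) : Decidable (Pre_solution N arr) := by
  unfold Pre_solution; infer_instance

def pvWitness_solution : Int × List Int := (4, [1, 2, 3, 5])

def Spec_solution (N : Int) (arr : List Int) (out : Int) : Prop := out = solution_alt N arr
instance (N : Int) (arr : List Int) (out : Int) : Decidable (Spec_solution N arr out) := by
  unfold Spec_solution; infer_instance

-- ===== CLAIM (what is proved, stated in full; the proofs are below) =====
def Claim_equal_solution : Prop :=
  ∀ (N : Int) (arr : List Int), Dom_solution N arr → Pre_solution N arr →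
    Spec_solution N arr (solution N arr)

-- ===== LEMMAS AND PROOFS =====

-- the common target of both inner loops: "some pair of distinct indices in [lo, hi],
-- both different from idx, sums to num"
def HasPair (a : List Int) (idx num lo hi : Int) : Prop :=
  ∃ p q : Int, lo ≤ p ∧ p < q ∧ q ≤ hi ∧ p ≠ idx ∧ q ≠ idx ∧ pvGet a p + pvGet a q = num

theorem twoPtr_mem (a : List Int) (idx num left right : Int) :
    twoPtr a idx num left right = 0 ∨ twoPtr a idx num left right = 1 := by
  fun_induction twoPtr a idx num left right <;> simp_all

theorem setScan_mem (a : List Int) (idx num N' j : Int) (seen : PySem.Set Int) :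
    setScan a idx num N' j seen = 0 ∨ setScan a idx num N' j seen = 1 := by
  fun_induction setScan a idx num N' j seen <;> simp_all

-- A's two-pointer loop finds 1 exactly when a valid pair exists in [left, right],
-- provided a is monotone on [0, hi] (sortedness).
theorem twoPtr_one_iff (a : List Int) (idx num hi : Int)
    (mono : ∀ i j : Int, 0 ≤ i → i ≤ j → j ≤ hi → pvGet a i ≤ pvGet a j)
    (left right : Int) :
    0 ≤ left → right ≤ hi →
    (twoPtr a idx num left right = 1 ↔ HasPair a idx num left right) := by
  fun_induction twoPtr a idx num left right
  case case1 left hcond ih =>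
    intro hl hr
    rw [ih (by omega) hr]
    constructor
    · rintro ⟨p, q, h1, h2, h3, h4, h5, h6⟩; exact ⟨p, q, by omega, h2, h3, h4, h5, h6⟩
    · rintro ⟨p, q, h1, h2, h3, h4, h5, h6⟩
      exact ⟨p, q, by omega, h2, h3, h4, h5, h6⟩
  case case2 left hcond hlidx ih =>
    intro hl hr
    rw [ih hl (by omega)]
    constructor
    · rintro ⟨p, q, h1, h2, h3, h4, h5, h6⟩; exact ⟨p, q, h1, h2, by omega, h4, h5, h6⟩
    · rintro ⟨p, q, h1, h2, h3, h4, h5, h6⟩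
      exact ⟨p, q, h1, h2, by omega, h4, h5, h6⟩
  case case3 left right hcond hlidx hridx heq =>
    intro hl hr
    simp only [true_iff]
    exact ⟨left, right, le_refl _, hcond, le_refl _, hlidx, hridx, heq⟩
  case case4 left right hcond hlidx hridx hne hlt ih =>
    intro hl hr
    rw [ih (by omega) hr]
    constructor
    · rintro ⟨p, q, h1, h2, h3, h4, h5, h6⟩; exact ⟨p, q, by omega, h2, h3, h4, h5, h6⟩
    · rintro ⟨p, q, h1, h2, h3, h4, h5, h6⟩
      refine ⟨p, q, ?_, h2, h3, h4, h5, h6⟩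
      rcases eq_or_lt_of_le h1 with hpl | hpl
      · exfalso
        subst hpl
        have : pvGet a q ≤ pvGet a right := mono q right (by omega) (by omega) hr
        omega
      · omega
  case case5 left right hcond hlidx hridx hne hge ih =>
    intro hl hr
    rw [ih hl (by omega)]
    constructor
    · rintro ⟨p, q, h1, h2, h3, h4, h5, h6⟩; exact ⟨p, q, h1, h2, by omega, h4, h5, h6⟩
    · rintro ⟨p, q, h1, h2, h3, h4, h5, h6⟩
      refine ⟨p, q, h1, h2, ?_, h4, h5, h6⟩
      rcases eq_or_lt_of_le h3 with hqr | hqr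
      · exfalso
        subst hqr
        have : pvGet a left ≤ pvGet a p := mono left p hl h1 (by omega)
        omega
      · omega
  case case6 left right hcond =>
    intro hl hr
    simp only [show ¬((0:Int) = 1) by decide, false_iff]
    rintro ⟨p, q, h1, h2, h3, _, _, _⟩
    omega

-- B's set-scan loop finds 1 exactly when a valid pair (p, q) with q ≥ j exists,
-- provided seen holds exactly the values at indices in [0, j) other than idx.
theorem setScan_one_iff (a : List Int) (idx num N' : Int) (j : Int) (seen : PySem.Set Int) :
    (∀ v : Int, v ∈ seen ↔ ∃ i : Int, 0 ≤ i ∧ i < j ∧ i ≠ idx ∧ pvGet a i = v) → 0 ≤ j →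
    (setScan a idx num N' j seen = 1 ↔
      (∃ p q : Int, 0 ≤ p ∧ p < q ∧ j ≤ q ∧ q < N' ∧ p ≠ idx ∧ q ≠ idx ∧
        pvGet a p + pvGet a q = num)) := by
  fun_induction setScan a idx num N' j seen
  case case1 seen hcond ih =>
    intro inv hj
    have inv' : ∀ v : Int, v ∈ seen ↔ ∃ i : Int, 0 ≤ i ∧ i < idx + 1 ∧ i ≠ idx ∧ pvGet a i = v := by
      intro v
      rw [inv v]
      constructor
      · rintro ⟨i, h1, h2, h3, h4⟩; exact ⟨i, h1, by omega, h3, h4⟩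
      · rintro ⟨i, h1, h2, h3, h4⟩; exact ⟨i, h1, by omega, h3, h4⟩
    rw [ih inv' (by omega)]
    constructor
    · rintro ⟨p, q, h1, h2, h3, h4, h5, h6, h7⟩; exact ⟨p, q, h1, h2, by omega, h4, h5, h6, h7⟩
    · rintro ⟨p, q, h1, h2, h3, h4, h5, h6, h7⟩; exact ⟨p, q, h1, h2, by omega, h4, h5, h6, h7⟩
  case case2 j seen hcond hjidx hc =>
    intro inv hj
    simp only [true_iff]
    have hmem : (num - pvGet a j) ∈ seen := (PySem.Set.contains_iff seen _).mp hc
    obtain ⟨p, h1, h2, h3, h4⟩ := (inv _).mp hmem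
    exact ⟨p, j, h1, h2, le_refl _, hcond, h3, hjidx, by omega⟩
  case case3 j seen hcond hjidx hc ih =>
    intro inv hj
    have inv' : ∀ v : Int, v ∈ PySem.Set.add seen (pvGet a j) ↔
        ∃ i : Int, 0 ≤ i ∧ i < j + 1 ∧ i ≠ idx ∧ pvGet a i = v := by
      intro v
      rw [PySem.Set.mem_add, inv v]
      constructor
      · rintro (⟨i, h1, h2, h3, h4⟩ | hv)
        · exact ⟨i, h1, by omega, h3, h4⟩
        · exact ⟨j, hj, by omega, hjidx, hv.symm⟩
      · rintro ⟨i, h1, h2, h3, h4⟩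
        by_cases hij : i = j
        · right; rw [← h4, hij]
        · left; exact ⟨i, h1, by omega, h3, h4⟩
    rw [ih inv' (by omega)]
    constructor
    · rintro ⟨p, q, h1, h2, h3, h4, h5, h6, h7⟩; exact ⟨p, q, h1, h2, by omega, h4, h5, h6, h7⟩
    · rintro ⟨p, q, h1, h2, h3, h4, h5, h6, h7⟩
      refine ⟨p, q, h1, h2, ?_, h4, h5, h6, h7⟩
      by_cases hqj : q = j
      · exfalso
        subst hqj
        have hm : (num - pvGet a q) ∈ seen := (inv _).mpr ⟨p, h1, h2, h5, by omega⟩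
        exact hc ((PySem.Set.contains_iff seen _).mpr hm)
      · omega
  case case4 j seen hcond =>
    intro inv hj
    simp only [show ¬((0:Int) = 1) by decide, false_iff]
    rintro ⟨p, q, h1, h2, h3, h4, _, _, _⟩
    omega

-- the sorted array is monotone on indices bounded by N - 1 < len
theorem sorted_mono (arr : List Int) (N : Int) (hN : N ≤ (arr.length : Int)) :
    ∀ i j : Int, 0 ≤ i → i ≤ j → j ≤ N - 1 →
      pvGet (PySem.List.sorted arr (fun x => x) false) i ≤
      pvGet (PySem.List.sorted arr (fun x => x) false) j := by
  intro i j hi hij hj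
  set a := PySem.List.sorted arr (fun x => x) false with ha
  have hlen : a.length = arr.length := PySem.List.length_sorted arr _ _
  have hjlen : j.toNat < a.length := by omega
  have hilen : i.toNat < a.length := by omega
  have h1 : pvGet a i = a[i.toNat] := by
    unfold pvGet
    rw [PySem.List.pyGet?_eq_some_getElem a hi (by omega)]
    rfl
  have h2 : pvGet a j = a[j.toNat] := by
    unfold pvGet
    rw [PySem.List.pyGet?_eq_some_getElem a (by omega : (0:Int) ≤ j) (by omega)]
    rfl
  rw [h1, h2]
  have hp : a.Pairwise (fun x y => x ≤ y) := by
    have := PySem.List.sorted_pairwise arr (fun x => x) (κ := Int)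
    simpa using this
  rcases Nat.lt_or_ge i.toNat j.toNat with hlt | hge
  · exact List.pairwise_iff_getElem.mp hp i.toNat j.toNat hilen hjlen hlt
  · have : i.toNat = j.toNat := by omega
    simp [this]

-- per-index agreement of the two inner loops
theorem inner_eq (arr : List Int) (N idx : Int) (hN : N ≤ (arr.length : Int))
    (_hidx0 : 0 ≤ idx) (_hidxN : idx < N) :
    twoPtr (PySem.List.sorted arr (fun x => x) false) idx
        (pvGet (PySem.List.sorted arr (fun x => x) false) idx) 0 (N - 1) =
    setScan (PySem.List.sorted arr (fun x => x) false) idx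
        (pvGet (PySem.List.sorted arr (fun x => x) false) idx) N 0 PySem.Set.empty := by
  set a := PySem.List.sorted arr (fun x => x) false with ha
  set num := pvGet a idx with hnum
  have hA := twoPtr_one_iff a idx num (N - 1) (sorted_mono arr N hN) 0 (N - 1)
    (le_refl 0) (le_refl _)
  have hB := setScan_one_iff a idx num N 0 PySem.Set.empty
    (by intro v
        constructor
        · intro h; exact absurd h (by simp [PySem.Set.empty])
        · rintro ⟨i, h1, h2, _, _⟩; omega)
    (le_refl 0)
  have hiff : twoPtr a idx num 0 (N - 1) = 1 ↔ setScan a idx num N 0 PySem.Set.empty = 1 := by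
    rw [hA, hB]
    constructor
    · rintro ⟨p, q, h1, h2, h3, h4, h5, h6⟩; exact ⟨p, q, h1, h2, by omega, by omega, h4, h5, h6⟩
    · rintro ⟨p, q, h1, h2, h3, h4, h5, h6, h7⟩; exact ⟨p, q, h1, h2, by omega, h5, h6, h7⟩
  rcases twoPtr_mem a idx num 0 (N - 1) with h0 | h1 <;>
    rcases setScan_mem a idx num N 0 PySem.Set.empty with g0 | g1 <;>
    omega

-- ===== VERDICT (by name: the statement is the Claim_ definition above) =====
theorem solution_spec : Claim_equal_solution := by
  intro N arr _hdom hpre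
  unfold Spec_solution solution solution_alt
  apply PySem.List.foldl_congr_mem
  intro ans idx hmem
  rw [PySem.List.mem_pyRange_one] at hmem
  rw [inner_eq arr N idx hpre hmem.1 hmem.2]
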